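-- pv_equiv track=rewrite | github.com/justinfx/fileseq | test/test_fuzz.py | _yrange
-- ===== SOURCE A (Python) =====
-- def _yrange(first, last=None, incr=1):
--     """
--     Simple value generator for the 1-20y5 syntax.
--     :param first: as per xrange
--     :param last: as per xrange
--     :param incr: as per xrange
--     :return: generator
--     """
--     if last is None:
--         first, last = 0, first
--     whole = list(range(first, last, 1 if incr >= 0 else -1))
--     filt = set(whole[::abs(incr)])
--     for i in whole:
--         if i not in filt:
--             yield i
-- ===== SOURCE B (Python) =====
-- def _yrange(first, last=None, incr=1):
--     """
--     Same values as A, but purely arithmetically: no range list and no set.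
--     The emitted values are first + sign*i for indices i = 0..n-1 that are
--     not multiples of abs(incr), detected with a modulo test.
--     """
--     if last is None:
--         first, last = 0, first
--     sign = 1 if incr >= 0 else -1
--     step = abs(incr)
--     n = (last - first) * sign
--     if n < 0:
--         n = 0
--     for i in range(n):
--         if i % step:
--             yield first + sign * i
-- ===== Notes on version B (the rewrite author's own statement) =====
-- stated objective: alternative
-- what changed: B materialises neither the range list nor the set of every-step-th values: it computes the element count n arithmetically and yields first + sign*i directly for each index i in range(n) whose i % abs(incr) is nonzero, replacing list+set+membership filtering by a pure index/modulo formulation.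
import Mathlib
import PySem

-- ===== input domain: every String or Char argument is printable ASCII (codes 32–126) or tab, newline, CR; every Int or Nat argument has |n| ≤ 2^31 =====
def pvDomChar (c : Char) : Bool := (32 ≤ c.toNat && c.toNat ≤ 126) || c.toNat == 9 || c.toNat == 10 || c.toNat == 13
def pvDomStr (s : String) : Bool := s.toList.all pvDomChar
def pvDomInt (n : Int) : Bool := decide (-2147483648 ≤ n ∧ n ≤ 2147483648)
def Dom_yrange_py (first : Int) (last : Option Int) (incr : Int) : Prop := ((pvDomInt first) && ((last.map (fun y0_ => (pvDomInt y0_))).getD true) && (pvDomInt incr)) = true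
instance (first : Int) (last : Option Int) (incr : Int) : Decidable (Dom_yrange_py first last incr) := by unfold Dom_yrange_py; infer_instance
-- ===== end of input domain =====

-- B replaces A's range-list + set-membership filter by a pure arithmetic formulation:
-- count n computed from the bounds, values first + sign*i emitted for indices with i % |incr| ≠ 0;
-- return-value equivalence is proved for incr ≠ 0 (A raises ValueError on incr = 0).


-- ===== PORT A =====
def yrange_py (first : Int) (last : Option Int) (incr : Int) : List Int :=
  let fl : Int × Int := match last with
    | none => (0, first)
    | some l => (first, l)
  let whole := PySem.List.pyRange fl.1 fl.2 (if 0 ≤ incr then 1 else -1)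
  let filt := PySem.Set.ofList ((PySem.List.slice? whole none none |incr|).getD [])
  whole.foldl (fun acc i => if i ∈ filt then acc else acc ++ [i]) []

-- ===== PORT B =====
def yrange_py_alt (first : Int) (last : Option Int) (incr : Int) : List Int :=
  let fl : Int × Int := match last with
    | none => (0, first)
    | some l => (first, l)
  let sign : Int := if 0 ≤ incr then 1 else -1
  let step : Int := |incr|
  let n0 : Int := (fl.2 - fl.1) * sign
  let n : Nat := (if n0 < 0 then 0 else n0).toNat
  (List.range n).foldl
    (fun acc (i : Nat) => if PySem.Int.mod (i : Int) step ≠ 0 then acc ++ [fl.1 + sign * (i : Int)] else acc) []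

-- ===== PRECONDITION & SPEC =====
-- Pre_ excludes exactly incr = 0, on which A raises ValueError (slice step 0 in whole[::0]).
def Pre_yrange_py (first : Int) (last : Option Int) (incr : Int) : Prop := incr ≠ 0
instance (first : Int) (last : Option Int) (incr : Int) : Decidable (Pre_yrange_py first last incr) := by unfold Pre_yrange_py; infer_instance
def pvWitness_yrange_py : Int × Option Int × Int := (1, some 12, 3)

def Spec_yrange_py (first : Int) (last : Option Int) (incr : Int) (out : List Int) : Prop := out = yrange_py_alt first last incr
instance (first : Int) (last : Option Int) (incr : Int) (out : List Int) : Decidable (Spec_yrange_py first last incr out) := by unfold Spec_yrange_py; infer_instance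

-- ===== CLAIM (what is proved, stated in full; the proofs are below) =====
def Claim_equal_yrange_py : Prop := ∀ (first : Int) (last : Option Int) (incr : Int), Dom_yrange_py first last incr → Pre_yrange_py first last incr → Spec_yrange_py first last incr (yrange_py first last incr)

-- ===== LEMMAS AND PROOFS =====

-- count of indices produced by slicing with step k
theorem pv_countInt (k : Nat) (n : Nat) :
    (if (0:Int) < (n:Int) then (((n:Int) - 0 + k - 1)/k).toNat else 0)
      = (if 0 < n then (n + k - 1)/k else 0) := by
  by_cases h : 0 < n
  · rw [if_pos (by exact_mod_cast h), if_pos h]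
    have : ((n:Int) - 0 + k - 1) = ((n + k - 1 : Nat) : Int) := by
      push_cast [Nat.cast_sub (by omega : 1 ≤ n + k)]; ring
    rw [this, Int.ofNat_ediv_ofNat, Int.toNat_natCast]
  · rw [if_neg (by exact_mod_cast h), if_neg h]

-- A's slice whole[::k] as a filterMap over strided indices
theorem pv_slice_eq (k : Nat) (hk : 1 ≤ k) (w : List Int) :
    PySem.List.slice? w none none (k : Int)
      = some ((List.range (if 0 < w.length then (w.length + k - 1)/k else 0)).filterMap
          (fun j => w[k*j]?)) := by
  have hk0 : ((k:Int)) ≠ 0 := by exact_mod_cast Nat.one_le_iff_ne_zero.1 hk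
  have hkpos : (0:Int) < (k:Int) := by exact_mod_cast hk
  rw [PySem.List.slice?, if_neg hk0]
  simp only [PySem.List.sliceIndices, if_neg (by omega : ¬ ((k:Int) < 0)), if_pos hkpos]
  rw [← pv_countInt k w.length]
  congr 1
  apply List.filterMap_congr
  intro j _
  have h : ((k:Int) * (j:Int)) = ((k*j : Nat) : Int) := by push_cast; ring
  rw [zero_add, h, Int.toNat_natCast]

-- whole is the arithmetic progression i ↦ a + s*i of length n
theorem pv_whole_eq (a b incr : Int) :
    PySem.List.pyRange a b (if 0 ≤ incr then 1 else -1)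
      = (List.range ((b - a) * (if 0 ≤ incr then (1:Int) else -1)).toNat).map
          (fun (i : Nat) => a + (if 0 ≤ incr then (1:Int) else -1) * (i : Int)) := by
  by_cases h : 0 ≤ incr
  · simp only [if_pos h, PySem.List.pyRange_one]
    rw [mul_one]
    exact List.map_congr_left (fun i _ => by ring)
  · simp only [if_neg h, PySem.List.pyRange_neg_one]
    rw [show (b - a) * (-1 : Int) = a - b from by ring]
    exact List.map_congr_left (fun i _ => by ring)

-- membership in the sliced sample ↔ divisibility of the index (the progression is injective)
theorem pv_mem_iff (a s : Int) (hs : s = 1 ∨ s = -1) (k n : Nat) (hk : 1 ≤ k) (i : Nat) (hi : i < n) :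
    (a + s * (i:Int))
        ∈ (List.range (if 0 < n then (n + k - 1)/k else 0)).filterMap
            (fun j => ((List.range n).map (fun (x : Nat) => a + s * (x:Int)))[k*j]?)
      ↔ k ∣ i := by
  have hinj : ∀ x y : Nat, a + s * (x:Int) = a + s * (y:Int) → x = y := by
    intro x y hxy
    rcases hs with h | h <;> (rw [h] at hxy; omega)
  constructor
  · intro hmem
    rcases List.mem_filterMap.1 hmem with ⟨j, _, hj⟩
    rw [List.getElem?_map] at hj
    by_cases hjn : k * j < n
    · rw [List.getElem?_range hjn] at hj
      simp only [Option.map_some] at hj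
      exact hinj _ _ (Option.some.inj hj) ▸ ⟨j, rfl⟩
    · rw [List.getElem?_eq_none (by simpa using hjn)] at hj
      simp at hj
  · rintro ⟨j, rfl⟩
    apply List.mem_filterMap.2
    refine ⟨j, ?_, ?_⟩
    · apply List.mem_range.2
      rw [if_pos (by omega)]
      have h1 : j * k + k ≤ n + k - 1 := by
        have := Nat.mul_comm k j
        omega
      have h2 : j + 1 ≤ (n + k - 1) / k :=
        (Nat.le_div_iff_mul_le (by omega)).2 (by rw [Nat.succ_mul]; omega)
      omega
    · rw [List.getElem?_map, List.getElem?_range hi]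
      rfl

-- the core equality, with the bounds already selected
theorem pv_core (a b incr : Int) (hpre : incr ≠ 0) :
    (PySem.List.pyRange a b (if 0 ≤ incr then 1 else -1)).foldl
      (fun acc i => if i ∈ PySem.Set.ofList
          ((PySem.List.slice? (PySem.List.pyRange a b (if 0 ≤ incr then 1 else -1)) none none |incr|).getD [])
        then acc else acc ++ [i]) []
    = (List.range (if (b - a) * (if 0 ≤ incr then (1:Int) else -1) < 0 then 0
          else (b - a) * (if 0 ≤ incr then (1:Int) else -1)).toNat).foldl
        (fun acc (i : Nat) => if PySem.Int.mod (i : Int) |incr| ≠ 0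
          then acc ++ [a + (if 0 ≤ incr then (1:Int) else -1) * (i : Int)] else acc) [] := by
  set s : Int := if 0 ≤ incr then (1:Int) else -1 with hsdef
  have hs : s = 1 ∨ s = -1 := by rw [hsdef]; split <;> simp
  set k : Nat := incr.natAbs with hkdef
  have hk : 1 ≤ k := Int.natAbs_pos.2 hpre
  have habs : |incr| = (k : Int) := Int.abs_eq_natAbs incr
  set n : Nat := ((b - a) * s).toNat with hndef
  have hn' : (if (b - a) * s < 0 then 0 else (b - a) * s).toNat = n := by
    rw [hndef]; split <;> omega
  rw [habs, hn', pv_whole_eq a b incr, ← hsdef, ← hndef]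
  set f : Nat → Int := fun (i : Nat) => a + s * (i : Int) with hfdef
  rw [pv_slice_eq k hk, Option.getD_some]
  simp only [List.length_map, List.length_range]
  set filt := (List.range (if 0 < n then (n + k - 1)/k else 0)).filterMap
      (fun j => ((List.range n).map f)[k*j]?) with hfiltdef
  -- A's loop is a filter over the mapped range; push the filter through the map
  have hA : ((List.range n).map f).foldl
      (fun acc i => if i ∈ PySem.Set.ofList filt then acc else acc ++ [i]) []
      = ((List.range n).filter (fun i => !decide (k ∣ i))).map f := by
    have h1 : ∀ (l : List Int) (acc : List Int),
        l.foldl (fun acc i => if i ∈ PySem.Set.ofList filt then acc else acc ++ [i]) acc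
        = acc ++ l.filter (fun i => !decide (i ∈ filt)) := by
      intro l acc
      rw [PySem.List.foldl_congr_mem l _
        (fun acc i => if (!decide (i ∈ filt)) = true then acc ++ [i] else acc) acc
        (by intro acc x _; by_cases h : x ∈ filt <;> simp [h, PySem.Set.mem_ofList])]
      exact PySem.List.foldl_append_if_eq_filter _ _ _
    rw [h1, List.nil_append, List.filter_map]
    congr 1
    apply List.filter_congr
    intro i hi
    have hiff := pv_mem_iff a s hs k n hk i (List.mem_range.1 hi)
    rw [← hfdef, ← hfiltdef] at hiff
    have hfi : f i ∈ filt ↔ k ∣ i := hiff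
    simp only [Function.comp_apply]
    simp [hfi]
  rw [hA]
  -- B's loop is the same filter expressed with a modulo test
  rw [PySem.List.foldl_congr_mem (List.range n) _
      (fun acc (i : Nat) => if (!decide (k ∣ i)) = true then acc ++ [f i] else acc) []
      (by
        intro acc i _
        have hmod : PySem.Int.mod (i : Int) (k : Int) = ((i % k : Nat) : Int) :=
          PySem.Int.mod_natCast i k
        by_cases h : k ∣ i
        · have hz : i % k = 0 := Nat.dvd_iff_mod_eq_zero.1 h
          simp [hmod, hz, h]
        · have hz : i % k ≠ 0 := fun h0 => h (Nat.dvd_iff_mod_eq_zero.2 h0)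
          simp [hmod, h, hfdef, Int.natCast_dvd_natCast])]
  rw [PySem.List.foldl_append_if, List.nil_append]

-- ===== VERDICT (by name: the statement is the Claim_ definition above) =====
theorem yrange_py_spec : Claim_equal_yrange_py := by
  intro first last incr _ hpre
  unfold Spec_yrange_py yrange_py yrange_py_alt
  cases last with
  | none => exact pv_core 0 first incr hpre
  | some l => exact pv_core first l incr hpre
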